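-- pv_equiv track=rewrite | github.com/moleculea/ess | local/ess-python/dtpm/cdate.py | month_proc
-- ===== SOURCE A (Python) =====
-- def month_proc(month):
--     if len(month) <= 2 :
--         if int(month)>12:
--             month = '12'
--         month = month.zfill(2)
--     else: # if len(month) > 2
--         month = month[-2:] # intercept last 2 digit
--         month = month_proc(month) # iterate the function it self
--     return month
-- ===== SOURCE B (Python) =====
-- def month_proc(month):
--     if len(month) > 2:
--         month = month[-2:]
--     if int(month) > 12:
--         month = '12'
--     return month.zfill(2)
-- ===== Notes on version B (the rewrite author's own statement) =====
-- stated objective: simpler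
-- what changed: A's self-recursion on the last-two-character suffix is flattened into straight-line code: one unconditional truncation, one clamp at twelve, one zfill(2).
import Mathlib
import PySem

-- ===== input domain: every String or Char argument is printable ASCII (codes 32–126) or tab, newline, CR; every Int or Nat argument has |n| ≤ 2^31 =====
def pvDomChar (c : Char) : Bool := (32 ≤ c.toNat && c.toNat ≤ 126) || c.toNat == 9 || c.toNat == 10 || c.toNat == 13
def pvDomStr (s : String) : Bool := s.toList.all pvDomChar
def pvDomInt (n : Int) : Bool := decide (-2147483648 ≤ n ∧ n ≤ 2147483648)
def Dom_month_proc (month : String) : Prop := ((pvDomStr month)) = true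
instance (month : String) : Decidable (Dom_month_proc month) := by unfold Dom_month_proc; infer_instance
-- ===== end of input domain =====

-- B flattens A's one-level recursion into straight-line truncate / clamp / zfill (objective: simpler).

-- ===== PORT A =====
-- literal port of A on List Char; the `none => cs` arm is unreachable under Pre_
-- (Python raises ValueError there, excluded by Pre_month_proc)
def monthProcA (cs : List Char) : List Char :=
  if _h : cs.length ≤ 2 then
    let cs' := match PySem.Int.ofChars? cs with      -- int(month) > 12
      | some n => if n > 12 then ['1', '2'] else cs
      | none => cs
    PySem.Chars.zfill cs' 2                          -- month.zfill(2)
  else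
    monthProcA (PySem.Chars.slice cs (some (-2)) none)   -- month[-2:], recurse
termination_by cs.length
decreasing_by
  simp only [PySem.Chars.slice_eq_listSlice, PySem.List.slice_some_none]
  have : PySem.List.clampIdx cs.length (-(2 : Int)) = cs.length - 2 :=
    PySem.List.clampIdx_neg_natCast cs.length 2 (by omega)
  simp [this]; omega

def month_proc (month : String) : String :=
  String.ofList (monthProcA month.toList)

-- ===== PORT B =====
def month_proc_alt (month : String) : String :=
  let cs := month.toList
  let cs1 := if cs.length > 2 then PySem.Chars.slice cs (some (-2)) none else cs  -- month = month[-2:]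
  let cs2 := match PySem.Int.ofChars? cs1 with                                    -- if int(month) > 12
    | some n => if n > 12 then ['1', '2'] else cs1
    | none => cs1
  String.ofList (PySem.Chars.zfill cs2 2)                                         -- month.zfill(2)

-- ===== PRECONDITION & SPEC =====
-- Pre_ = exactly the inputs where Python's int() succeeds (on month itself, or on its
-- last two characters when len(month) > 2); elsewhere A raises ValueError.
def Pre_month_proc (month : String) : Prop :=
  (PySem.Int.ofChars? (if month.toList.length ≤ 2 then month.toList
      else PySem.Chars.slice month.toList (some (-2)) none)).isSome = true
instance (month : String) : Decidable (Pre_month_proc month) := by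
  unfold Pre_month_proc; infer_instance

def pvWitness_month_proc : String := "7"

def Spec_month_proc (month : String) (out : String) : Prop := out = month_proc_alt month
instance (month : String) (out : String) : Decidable (Spec_month_proc month out) := by
  unfold Spec_month_proc; infer_instance

-- ===== CLAIM (what is proved, stated in full; the proofs are below) =====
def Claim_equal_month_proc : Prop := ∀ (month : String), Dom_month_proc month → Pre_month_proc month → Spec_month_proc month (month_proc month)

-- ===== LEMMAS AND PROOFS =====

lemma slice_last2_len {cs : List Char} (h : ¬ cs.length ≤ 2) :
    (PySem.Chars.slice cs (some (-2)) none).length = 2 := by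
  simp only [PySem.Chars.slice_eq_listSlice, PySem.List.slice_some_none]
  have : PySem.List.clampIdx cs.length (-(2 : Int)) = cs.length - 2 :=
    PySem.List.clampIdx_neg_natCast cs.length 2 (by omega)
  simp [this]; omega

lemma monthProcA_base {cs : List Char} (h : cs.length ≤ 2) :
    monthProcA cs =
      PySem.Chars.zfill
        (match PySem.Int.ofChars? cs with
          | some n => if n > 12 then ['1', '2'] else cs
          | none => cs) 2 := by
  rw [monthProcA]; simp only [dif_pos h]

lemma monthProcA_eq (cs : List Char) :
    monthProcA cs =
      (let cs1 := if cs.length > 2 then PySem.Chars.slice cs (some (-2)) none else cs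
       let cs2 := match PySem.Int.ofChars? cs1 with
         | some n => if n > 12 then ['1', '2'] else cs1
         | none => cs1
       PySem.Chars.zfill cs2 2) := by
  by_cases h : cs.length ≤ 2
  · rw [monthProcA_base h]
    simp [show ¬ cs.length > 2 by omega]
  · rw [monthProcA]
    simp only [dif_neg h]
    rw [monthProcA_base (by rw [slice_last2_len h])]
    simp [show cs.length > 2 by omega]

-- ===== VERDICT (by name: the statement is the Claim_ definition above) =====
theorem month_proc_spec : Claim_equal_month_proc := by
  intro month _ _
  unfold Spec_month_proc month_proc month_proc_alt
  rw [monthProcA_eq]
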